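-- pv_equiv track=rewrite | github.com/mjcumming/wiim | scripts/sync-pywiim-version.py | _set_requirements_dev_pywiim_pin
-- ===== SOURCE A (Python) =====
-- def _set_requirements_dev_pywiim_pin(lines: list[str], version: str) -> list[str]:
--     out: list[str] = []
--     replaced = False
--     for line in lines:
--         stripped = line.strip()
--         if stripped.startswith("pywiim==") and not replaced:
--             out.append(f"pywiim=={version}\n")
--             replaced = True
--         else:
--             out.append(line)
--     if not replaced:
--         # Keep it simple: append if missing.
--         if out and not out[-1].endswith("\n"):
--             out[-1] += "\n"
--         out.append("\n# Integration runtime dependencies (matches manifest.json)\n")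
--         out.append(f"pywiim=={version}\n")
--     return out
-- ===== SOURCE B (Python) =====
-- def _set_requirements_dev_pywiim_pin(lines: list[str], version: str) -> list[str]:
--     pin = f"pywiim=={version}\n"
--     i = next((i for i, l in enumerate(lines)
--               if l.strip().startswith("pywiim==")), None)
--     if i is not None:
--         return lines[:i] + [pin] + lines[i + 1:]
--     out = list(lines)
--     if out and not out[-1].endswith("\n"):
--         out[-1] += "\n"
--     out.append("\n# Integration runtime dependencies (matches manifest.json)\n")
--     out.append(pin)
--     return out
-- ===== Notes on version B (the rewrite author's own statement) =====
-- stated objective: simpler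
-- what changed: Replaces the per-element loop with a replaced flag and incremental list building by a single index lookup of the first pywiim== line followed by slice concatenation (or, if absent, a copy with newline fixup and appended block).
import Mathlib
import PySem

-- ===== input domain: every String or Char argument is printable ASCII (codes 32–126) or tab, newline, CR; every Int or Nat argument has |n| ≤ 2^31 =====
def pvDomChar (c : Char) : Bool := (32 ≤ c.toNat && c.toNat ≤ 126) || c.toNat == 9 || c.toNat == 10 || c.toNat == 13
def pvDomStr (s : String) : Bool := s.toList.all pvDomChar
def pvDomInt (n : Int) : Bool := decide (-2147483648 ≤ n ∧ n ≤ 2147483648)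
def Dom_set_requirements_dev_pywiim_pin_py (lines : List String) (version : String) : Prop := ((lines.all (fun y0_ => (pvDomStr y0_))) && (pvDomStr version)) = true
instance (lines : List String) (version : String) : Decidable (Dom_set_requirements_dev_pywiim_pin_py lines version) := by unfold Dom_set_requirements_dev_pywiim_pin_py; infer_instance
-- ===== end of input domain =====

-- B replaces A's per-element flag loop by an index lookup of the first pywiim== line
-- plus slice concatenation (objective: simpler).

-- ===== PORT A =====
-- the for-loop with 'out'/'replaced' state: structural recursion carrying the flag
def pvALoop (version : String) (replaced : Bool) : List String → List String × Bool
  | [] => ([], replaced)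
  | line :: rest =>
    let stripped := PySem.Str.strip line
    if PySem.Str.startswith stripped "pywiim==" && !replaced then
      let r := pvALoop version true rest
      (("pywiim==" ++ version ++ "\n") :: r.1, r.2)
    else
      let r := pvALoop version replaced rest
      (line :: r.1, r.2)

def set_requirements_dev_pywiim_pin_py (lines : List String) (version : String) : List String :=
  let r := pvALoop version false lines
  if !r.2 then
    -- 'if out and not out[-1].endswith("\n"): out[-1] += "\n"'
    let out :=
      match r.1.getLast? with
      | some last =>
        if !(PySem.Str.endswith last "\n") then r.1.dropLast ++ [last ++ "\n"] else r.1
      | none => r.1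
    out ++ ["\n# Integration runtime dependencies (matches manifest.json)\n",
            "pywiim==" ++ version ++ "\n"]
  else r.1

-- ===== PORT B =====
def set_requirements_dev_pywiim_pin_py_alt (lines : List String) (version : String) : List String :=
  let pin := "pywiim==" ++ version ++ "\n"
  match lines.findIdx? (fun l => PySem.Str.startswith (PySem.Str.strip l) "pywiim==") with
  | some i => lines.take i ++ [pin] ++ lines.drop (i + 1)
  | none =>
    match lines.getLast? with
    | some last =>
      if PySem.Str.endswith last "\n" then
        lines ++ ["\n# Integration runtime dependencies (matches manifest.json)\n", pin]
      else
        lines.dropLast ++ [last ++ "\n",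
          "\n# Integration runtime dependencies (matches manifest.json)\n", pin]
    | none => ["\n# Integration runtime dependencies (matches manifest.json)\n", pin]

-- ===== PRECONDITION & SPEC =====
def Spec_set_requirements_dev_pywiim_pin_py (lines : List String) (version : String) (out : List String) : Prop := out = set_requirements_dev_pywiim_pin_py_alt lines version
instance (lines : List String) (version : String) (out : List String) : Decidable (Spec_set_requirements_dev_pywiim_pin_py lines version out) := by unfold Spec_set_requirements_dev_pywiim_pin_py; infer_instance

-- ===== CLAIM (what is proved, stated in full; the proofs are below) =====
def Claim_equal_set_requirements_dev_pywiim_pin_py : Prop := ∀ (lines : List String) (version : String), Dom_set_requirements_dev_pywiim_pin_py lines version → Spec_set_requirements_dev_pywiim_pin_py lines version (set_requirements_dev_pywiim_pin_py lines version)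

-- ===== LEMMAS AND PROOFS =====

-- once replaced, the loop copies the rest verbatim
theorem pvALoop_true (version : String) (ls : List String) :
    pvALoop version true ls = (ls, true) := by
  induction ls with
  | nil => rfl
  | cons l rest ih => simp [pvALoop, ih]

-- characterisation of the loop (flag false) by the first matching index
theorem pvALoop_false (version : String) (ls : List String) :
    pvALoop version false ls =
      match ls.findIdx? (fun l => PySem.Str.startswith (PySem.Str.strip l) "pywiim==") with
      | some i => (ls.take i ++ ("pywiim==" ++ version ++ "\n") :: ls.drop (i + 1), true)
      | none => (ls, false) := by
  induction ls with
  | nil => rfl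
  | cons l rest ih =>
    by_cases hp : PySem.Chars.startswith (PySem.Chars.strip l.toList)
        ['p', 'y', 'w', 'i', 'i', 'm', '=', '='] = true
    · simp [pvALoop, pvALoop_true, List.findIdx?_cons, hp]
    · simp only [pvALoop, List.findIdx?_cons]
      rw [ih]
      simp only [PySem.Str.startswith_eq, PySem.Str.toList_strip]
      cases h : List.findIdx?
          (fun l => PySem.Chars.startswith (PySem.Chars.strip l.toList)
            ['p', 'y', 'w', 'i', 'i', 'm', '=', '=']) rest with
      | none => simp [h, hp]
      | some i => simp [h, hp, List.take_succ_cons, List.drop_succ_cons]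

theorem set_requirements_dev_pywiim_pin_py_eq (lines : List String) (version : String) :
    set_requirements_dev_pywiim_pin_py lines version
      = set_requirements_dev_pywiim_pin_py_alt lines version := by
  unfold set_requirements_dev_pywiim_pin_py set_requirements_dev_pywiim_pin_py_alt
  rw [pvALoop_false]
  cases h : lines.findIdx? (fun l => PySem.Str.startswith (PySem.Str.strip l) "pywiim==") with
  | some i => simp
  | none =>
    simp only
    cases hl : lines.getLast? with
    | none =>
      have : lines = [] := List.getLast?_eq_none_iff.mp hl
      simp [this]
    | some last =>
      by_cases he : PySem.Chars.endswith last.toList ['\n'] = true <;> simp [he]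

-- ===== VERDICT (by name: the statement is the Claim_ definition above) =====
theorem set_requirements_dev_pywiim_pin_py_spec : Claim_equal_set_requirements_dev_pywiim_pin_py := by
  intro lines version _
  exact set_requirements_dev_pywiim_pin_py_eq lines version
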